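-- pv_equiv track=rewrite | github.com/uibk-iNNference/unaNNticipated | experiments/equivalence_classes/eval.py | get_rounded_count
-- ===== SOURCE A (Python) =====
-- def get_rounded_count(cores: int) -> int:
--     borderline_counts = [1, 2, 4, 8, 9]
--     rounded_count = None
--     for borderline_count in borderline_counts:
--         if cores >= borderline_count:
--             rounded_count = borderline_count
--     assert rounded_count is not None
--
--     return rounded_count
-- ===== SOURCE B (Python) =====
-- import bisect
--
-- _BORDERLINES = [1, 2, 4, 8, 9]
--
-- def get_rounded_count(cores: int) -> int:
--     idx = bisect.bisect_right(_BORDERLINES, cores)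
--     assert idx > 0
--     return _BORDERLINES[idx - 1]
-- ===== Notes on version B (the rewrite author's own statement) =====
-- stated objective: idiomatic
-- what changed: Replaces the linear scan that keeps the last threshold <= cores with a bisect_right binary search over the sorted borderline list, indexing the largest threshold <= cores directly.
import Mathlib
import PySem

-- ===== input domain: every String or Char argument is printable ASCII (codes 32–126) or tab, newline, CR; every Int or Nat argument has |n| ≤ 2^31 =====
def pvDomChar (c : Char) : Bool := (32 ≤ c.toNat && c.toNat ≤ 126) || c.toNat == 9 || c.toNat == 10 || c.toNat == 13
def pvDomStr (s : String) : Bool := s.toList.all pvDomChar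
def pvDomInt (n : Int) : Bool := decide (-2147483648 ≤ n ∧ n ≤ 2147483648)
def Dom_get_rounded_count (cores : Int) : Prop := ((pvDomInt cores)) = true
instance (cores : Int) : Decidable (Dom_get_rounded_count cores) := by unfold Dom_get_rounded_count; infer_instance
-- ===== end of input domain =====

-- B: bisect_right over the sorted borderline list instead of A's linear keep-last scan (idiomatic).
-- Pre_ excludes cores < 1, where both Pythons raise AssertionError.
-- ===== PORT A =====
-- A's loop: fold keeping the last borderline <= cores in an Option accumulator; the final
-- `assert rounded_count is not None` can only fail outside Pre_, where .getD 0 stands for the raise.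
def get_rounded_count (cores : Int) : Int :=
  (([1, 2, 4, 8, 9] : List Int).foldl
    (fun acc b => if cores ≥ b then some b else acc) (none : Option Int)).getD 0

-- ===== PORT B =====
-- bisect.bisect_right on a sorted list = number of elements ≤ x (insertion point after equals)
def pvBisectRight (l : List Int) (x : Int) : Nat := l.countP (fun e => e ≤ x)

def get_rounded_count_alt (cores : Int) : Int :=
  let idx := pvBisectRight [1, 2, 4, 8, 9] cores
  -- assert idx > 0 raises outside Pre_; .getD 0 stands for the raise
  if idx > 0 then (PySem.List.pyGet? ([1, 2, 4, 8, 9] : List Int) ((idx : Int) - 1)).getD 0 else 0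

-- ===== PRECONDITION & SPEC =====
-- Pre_: A's assert fires (AssertionError) exactly when cores < 1.
def Pre_get_rounded_count (cores : Int) : Prop := 1 ≤ cores
instance (cores : Int) : Decidable (Pre_get_rounded_count cores) := by unfold Pre_get_rounded_count; infer_instance
def pvWitness_get_rounded_count : Int := 5
def Spec_get_rounded_count (cores : Int) (out : Int) : Prop := out = get_rounded_count_alt cores
instance (cores : Int) (out : Int) : Decidable (Spec_get_rounded_count cores out) := by unfold Spec_get_rounded_count; infer_instance

-- ===== CLAIM (what is proved, stated in full; the proofs are below) =====
def Claim_equal_get_rounded_count : Prop := ∀ (cores : Int), Dom_get_rounded_count cores → Pre_get_rounded_count cores → Spec_get_rounded_count cores (get_rounded_count cores)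

-- ===== LEMMAS AND PROOFS =====

-- ===== VERDICT (by name: the statement is the Claim_ definition above) =====
theorem get_rounded_count_spec : Claim_equal_get_rounded_count := by
  intro cores _ hpre
  unfold Pre_get_rounded_count at hpre
  unfold Spec_get_rounded_count get_rounded_count get_rounded_count_alt pvBisectRight
  by_cases h9 : (9:Int) ≤ cores <;> by_cases h8 : (8:Int) ≤ cores <;>
    by_cases h4 : (4:Int) ≤ cores <;> by_cases h2 : (2:Int) ≤ cores <;>
    first
      | (exfalso; omega)
      | simp [List.countP, List.countP.go, PySem.List.pyGet?, PySem.List.pyIdx?,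
          show (1:Int) ≤ cores from hpre, h9, h8, h4, h2]
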